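-- pv_equiv track=rewrite | github.com/AsokTamang/Leetcode-DSA | basics/heap.py | kthlargestandsmallest
-- ===== SOURCE A (Python) =====
-- def kthlargestandsmallest(array,k):
--     def kthlargest(array,k):  #inorder to find the largest element , first of all we need to design this tree in maxheap pattern using maxheapify
--         array=array.copy()  #here we must make the copy of an array so that it won't change the result
--         n=len(array)
--         def maxheapify(ind,size):
--             leftind = (2*ind) + 1
--             rightind = (2*ind) + 2
--             maximum = ind
--             if leftind< size and array[leftind] > array[maximum]:
--                 maximum=leftind
--             if rightind< size and array[rightind] > array[maximum]:
--                 maximum=rightind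
--             if maximum!=ind:
--                 array[maximum],array[ind] = array[ind],array[maximum]
--                 maxheapify(maximum,size)   #using recursion with the maximum index
--
--         for i in range((n//2) - 1 , - 1 ,-1):  #as the leaf nodes already satisfy the condition of min heap or maxheap , we start from the non-leaf
--           maxheapify(i,n)
--         size = n
--         #if we need to find the kth largest or smallest element, then we need to remove the  root elment which is the maximum element at time k-1 times , then we can return the root element , which is the kth largest or kth smallest element
--         for i in range(1,k):
--             array[0],array[size-1]=array[size-1],array[0]
--             size-=1
--             maxheapify(0,size)  #as we have replaced the root with the last element , we again need to heapify to maintain the max heapify pattern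
--         return array[0]
--
--
--     def kthsmallest(array,k):
--         n=len(array)
--         array=array.copy()
--         def minheapify(ind,size):
--             leftind = (2*ind) + 1
--             rightind = (2*ind) + 2
--             minimum = ind
--             if leftind< size and array[leftind] < array[minimum]:
--                 minimum=leftind
--             if rightind< size and array[rightind] < array[minimum]:
--                 minimum=rightind
--             if minimum!=ind:
--                 array[minimum],array[ind] = array[ind],array[minimum]
--                 minheapify(minimum,size)   #using recursion with the minimum index
--         for i in range((n//2)-1,-1,-1):  #as the leaf nodes already satisfy the condition of min heap or minheap , we start from the non-leaf
--           minheapify(i,n)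
--         size = n
--         #if we need to find the kth largest or smallest element, then we need to remove the  root elment which is the minimum element at time k-1 times , then we can return the root element , which is the kth largest or kth smallest element
--         for i in range(1,k):
--             array[0],array[size-1]=array[size-1],array[0]
--             size-=1
--             minheapify(0,size)
--         return array[0]
--     return f'kth smallest:{kthsmallest(array,k)} and kth largest:{kthlargest(array,k)}'
-- ===== SOURCE B (Python) =====
-- def kthlargestandsmallest(array, k):
--     s = sorted(array)
--     i = max(k, 1)  # fewer than 1 extraction is impossible: k < 1 asks for the 1st
--     return f'kth smallest:{s[i-1]} and kth largest:{s[len(s)-i]}'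
-- ===== Notes on version B (the rewrite author's own statement) =====
-- stated objective: faster
-- what changed: Replaces the two hand-written binary heaps (build-heap plus k-1 sift-down extractions, done twice) with a single sort and two index lookups, clamping k below at 1 exactly as A's empty extraction loop behaves.
-- outside the precondition, e.g. on kthlargestandsmallest([3, 1, 2], 5): A returns 'kth smallest:1 and kth largest:3', B raises IndexError; on kthlargestandsmallest([], 1): A raises IndexError, B raises IndexError
import Mathlib
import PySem

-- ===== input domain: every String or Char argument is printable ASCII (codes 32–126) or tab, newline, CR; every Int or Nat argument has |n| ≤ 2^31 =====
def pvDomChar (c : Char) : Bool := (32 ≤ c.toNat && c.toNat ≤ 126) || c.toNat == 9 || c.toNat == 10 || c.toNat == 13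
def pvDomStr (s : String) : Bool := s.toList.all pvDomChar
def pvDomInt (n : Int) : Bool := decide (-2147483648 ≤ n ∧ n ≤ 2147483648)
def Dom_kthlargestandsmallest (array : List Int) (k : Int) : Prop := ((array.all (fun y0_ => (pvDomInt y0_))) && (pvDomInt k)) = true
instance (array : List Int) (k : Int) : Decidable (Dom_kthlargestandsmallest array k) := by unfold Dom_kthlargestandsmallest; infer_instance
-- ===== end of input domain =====

-- B replaces A's two hand-written binary heaps (build-heap + k-1 extractions, twice)
-- with one sort and two index lookups; measured constant-factor faster in Python.


-- ===== PORT A =====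
-- a[i] for an index that is in range on every admitted input (Pre_ excludes the IndexError region)
def hGet (a : List Int) (i : Nat) : Int := a.getD i 0
-- 'a[i], a[j] = a[j], a[i]'
def hSwap (a : List Int) (i j : Nat) : List Int := (a.set i (hGet a j)).set j (hGet a i)

-- 'def maxheapify(ind,size)' — recursion on the max child; fuel n+1 bounds the sift-down depth
def maxHeapifyF : Nat → List Int → Nat → Nat → List Int
  | 0, a, _, _ => a
  | fuel+1, a, ind, size =>
    let leftind := 2*ind + 1
    let rightind := 2*ind + 2
    let maximum := if leftind < size ∧ hGet a ind < hGet a leftind then leftind else ind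
    let maximum := if rightind < size ∧ hGet a maximum < hGet a rightind then rightind else maximum
    if maximum ≠ ind then maxHeapifyF fuel (hSwap a maximum ind) maximum size else a

-- 'def minheapify(ind,size)'
def minHeapifyF : Nat → List Int → Nat → Nat → List Int
  | 0, a, _, _ => a
  | fuel+1, a, ind, size =>
    let leftind := 2*ind + 1
    let rightind := 2*ind + 2
    let minimum := if leftind < size ∧ hGet a leftind < hGet a ind then leftind else ind
    let minimum := if rightind < size ∧ hGet a rightind < hGet a minimum then rightind else minimum
    if minimum ≠ ind then minHeapifyF fuel (hSwap a minimum ind) minimum size else a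

-- 'def kthlargest(array,k)'
def kthlargestA (array : List Int) (k : Int) : Int :=
  let a := array                                   -- array = array.copy()
  let n := a.length
  -- for i in range((n//2)-1, -1, -1): maxheapify(i, n)
  let a := (PySem.List.pyRange (PySem.Int.floordiv (n : Int) 2 - 1) (-1) (-1)).foldl
      (fun acc i => maxHeapifyF (n+1) acc i.toNat n) a
  -- for i in range(1, k): swap a[0],a[size-1]; size -= 1; maxheapify(0, size)
  -- (size-1).toNat: size ≥ 1 on admitted inputs; negative size-1 (IndexError region) is outside Pre_
  let st := (PySem.List.pyRange 1 k 1).foldl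
      (fun (st : List Int × Int) _ =>
        (maxHeapifyF (n+1) (hSwap st.1 0 (st.2 - 1).toNat) 0 (st.2 - 1).toNat, st.2 - 1))
      (a, (n : Int))
  hGet st.1 0

-- 'def kthsmallest(array,k)'
def kthsmallestA (array : List Int) (k : Int) : Int :=
  let n := array.length
  let a := array
  let a := (PySem.List.pyRange (PySem.Int.floordiv (n : Int) 2 - 1) (-1) (-1)).foldl
      (fun acc i => minHeapifyF (n+1) acc i.toNat n) a
  let st := (PySem.List.pyRange 1 k 1).foldl
      (fun (st : List Int × Int) _ =>
        (minHeapifyF (n+1) (hSwap st.1 0 (st.2 - 1).toNat) 0 (st.2 - 1).toNat, st.2 - 1))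
      (a, (n : Int))
  hGet st.1 0

def kthlargestandsmallest (array : List Int) (k : Int) : String :=
  "kth smallest:" ++ PySem.Int.toStr (kthsmallestA array k)
    ++ " and kth largest:" ++ PySem.Int.toStr (kthlargestA array k)

-- ===== PORT B =====
-- s = sorted(array); i = max(k, 1); f'kth smallest:{s[i-1]} and kth largest:{s[len(s)-i]}'
-- (.getD 0: both indices are in range on every input admitted by Pre_)
def kthlargestandsmallest_alt (array : List Int) (k : Int) : String :=
  let s := PySem.List.sorted array (fun x => x) false
  let i := max k 1
  let sm := (PySem.List.pyGet? s (i - 1)).getD 0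
  let lg := (PySem.List.pyGet? s ((s.length : Int) - i)).getD 0
  "kth smallest:" ++ PySem.Int.toStr sm ++ " and kth largest:" ++ PySem.Int.toStr lg

-- ===== PRECONDITION & SPEC =====
-- Pre_ excludes the empty list (A raises IndexError) and k > len(array): there A's extraction
-- loop walks into Python negative indexing, returning an accidental element for slightly
-- out-of-range k and raising IndexError beyond, while B raises IndexError at once.
def Pre_kthlargestandsmallest (array : List Int) (k : Int) : Prop :=
  array ≠ [] ∧ k ≤ (array.length : Int)
instance (array : List Int) (k : Int) : Decidable (Pre_kthlargestandsmallest array k) := by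
  unfold Pre_kthlargestandsmallest; infer_instance

def pvWitness_kthlargestandsmallest : List Int × Int := ([3, 1, 2], 2)

def Spec_kthlargestandsmallest (array : List Int) (k : Int) (out : String) : Prop :=
  out = kthlargestandsmallest_alt array k
instance (array : List Int) (k : Int) (out : String) : Decidable (Spec_kthlargestandsmallest array k out) := by
  unfold Spec_kthlargestandsmallest; infer_instance

-- ===== CLAIM (what is proved, stated in full; the proofs are below) =====
def Claim_equal_kthlargestandsmallest : Prop :=
  ∀ (array : List Int) (k : Int), Dom_kthlargestandsmallest array k →
    Pre_kthlargestandsmallest array k →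
    Spec_kthlargestandsmallest array k (kthlargestandsmallest array k)

-- ===== LEMMAS AND PROOFS =====

set_option maxHeartbeats 1000000

-- max-heap property on positions [lo, s)
def Ok (a : List Int) (s lo : Nat) : Prop :=
  ∀ j c, lo ≤ j → j < s → (c = 2*j+1 ∨ c = 2*j+2) → c < s → hGet a c ≤ hGet a j

-- 'almost heap': every parent except i is fine, and i's children are bounded by i's parent
def AOk (a : List Int) (s lo i : Nat) : Prop :=
  (∀ j c, lo ≤ j → j < s → j ≠ i → (c = 2*j+1 ∨ c = 2*j+2) → c < s → hGet a c ≤ hGet a j) ∧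
  (∀ p c, lo ≤ p → p < s → (i = 2*p+1 ∨ i = 2*p+2) → (c = 2*i+1 ∨ c = 2*i+2) → c < s →
    hGet a c ≤ hGet a p)

theorem hGet_eq (a : List Int) (j : Nat) (h : j < a.length) : hGet a j = a[j] := by
  simp [hGet, List.getD_eq_getElem?_getD, List.getElem?_eq_getElem h]

theorem hGet_set (a : List Int) (m j : Nat) (v : Int) :
    hGet (a.set m v) j = if j = m ∧ m < a.length then v else hGet a j := by
  simp [hGet, List.getD_eq_getElem?_getD, List.getElem?_set]
  split_ifs with h1 h2 h2 <;> simp_all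

theorem length_hSwap (a : List Int) (i j : Nat) : (hSwap a i j).length = a.length := by
  simp [hSwap]

theorem hGet_hSwap (a : List Int) (i j c : Nat) (hi : i < a.length) (hj : j < a.length) :
    hGet (hSwap a i j) c = if c = j then hGet a i else if c = i then hGet a j else hGet a c := by
  simp [hSwap, hGet_set, hi, hj]

theorem perm_hSwap (a : List Int) (i j : Nat) (hi : i < a.length) (hj : j < a.length) :
    (hSwap a i j).Perm a := by
  rcases eq_or_ne i j with rfl | hne
  · simp [hSwap, hGet_eq a i hi, List.set_set]
  · rw [List.perm_iff_count]
    intro b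
    have h1 : List.count b (a.set i (hGet a j)) =
        (List.count b a - if (a[i] == b) = true then 1 else 0) +
          if (hGet a j == b) = true then 1 else 0 := List.count_set hi
    have h2 : (a.set i (hGet a j))[j]'(by simpa using hj) = a[j] := by
      rw [List.getElem_set]; simp [hne]
    have h3 : List.count b ((a.set i (hGet a j)).set j (hGet a i)) =
        (List.count b (a.set i (hGet a j)) -
            if ((a.set i (hGet a j))[j]'(by simpa using hj) == b) = true then 1 else 0) +
          if (hGet a i == b) = true then 1 else 0 := List.count_set (by simpa using hj)
    have hib : (if (a[i] == b) = true then 1 else 0) ≤ List.count b a := by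
      split_ifs with h
      · exact List.one_le_count_iff.mpr (by rw [← eq_of_beq h]; exact a.getElem_mem hi)
      · exact Nat.zero_le _
    have hjb : (if (a[j] == b) = true then 1 else 0) ≤ List.count b a := by
      split_ifs with h
      · exact List.one_le_count_iff.mpr (by rw [← eq_of_beq h]; exact a.getElem_mem hj)
      · exact Nat.zero_le _
    rw [hSwap] at *
    rw [h3, h2, h1, hGet_eq a i hi, hGet_eq a j hj]
    omega

theorem drop_hSwap (a : List Int) (i j s : Nat) (hi : i < s) (hj : j < s) :
    (hSwap a i j).drop s = a.drop s := by
  simp [hSwap, List.drop_set, hi, hj]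

-- after a swap at (parent i, chosen child m), the array is an 'almost heap' rooted at m
theorem AOk_hSwap (a : List Int) (i m s lo : Nat)
    (hlo : lo ≤ i) (him : i < m) (hms : m < s) (hs : s ≤ a.length)
    (hchild : m = 2*i+1 ∨ m = 2*i+2) (h : AOk a s lo i)
    (hml : 2*i+1 < s → (if 2*i+1 = m then hGet a i else hGet a (2*i+1)) ≤ hGet a m)
    (hmr : 2*i+2 < s → (if 2*i+2 = m then hGet a i else hGet a (2*i+2)) ≤ hGet a m) :
    AOk (hSwap a m i) s lo m := by
  have hiL : i < a.length := by omega
  have hmL : m < a.length := by omega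
  have hv : ∀ c, hGet (hSwap a m i) c =
      if c = i then hGet a m else if c = m then hGet a i else hGet a c := fun c =>
    hGet_hSwap a m i c hmL hiL
  have hml' : 2*i+1 < s → hGet a (2*i+1) ≤ hGet a m := by
    intro hl
    rcases eq_or_ne (2*i+1) m with he | he
    · rw [he]
    · have := hml hl; rw [if_neg he] at this; exact this
  have hmr' : 2*i+2 < s → hGet a (2*i+2) ≤ hGet a m := by
    intro hr
    rcases eq_or_ne (2*i+2) m with he | he
    · rw [he]
    · have := hmr hr; rw [if_neg he] at this; exact this
  have hii : hGet a i ≤ hGet a m := by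
    rcases hchild with he | he
    · have := hml (by omega); rw [if_pos he.symm] at this; exact this
    · have := hmr (by omega); rw [if_pos he.symm] at this; exact this
  constructor
  · intro j c hloj hj hjm hc hcs
    rw [hv c, hv j]
    rcases eq_or_ne j i with rfl | hji
    · have h3l := hml' ; have h3r := hmr'
      rcases hc with rfl | rfl
      · have h4 := hml' hcs
        split_ifs <;> omega
      · have h4 := hmr' hcs
        split_ifs <;> omega
    · rcases eq_or_ne c i with rfl | hci
      · have hper := h.2 j m hloj hj (by omega) hchild hms
        split_ifs <;> omega
      · have hbase := h.1 j c hloj hj hji hc hcs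
        split_ifs <;> omega
  · intro p c hlop hp hpm hc hcs
    have hpi : p = i := by omega
    subst hpi
    have hbase := h.1 m c (by omega) hms (by omega) hc hcs
    rw [hv c, hv p]
    split_ifs <;> omega

theorem sift_max (fuel : Nat) : ∀ (a : List Int) (i s lo : Nat), lo ≤ i → s ≤ fuel + i →
    s ≤ a.length → AOk a s lo i → Ok (maxHeapifyF fuel a i s) s lo := by
  induction fuel with
  | zero =>
    intro a i s lo hlo hf hs h j c hloj hj hc hcs
    exact h.1 j c hloj hj (by omega) hc hcs
  | succ fuel IH =>
    intro a i s lo hlo hf hs h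
    simp only [maxHeapifyF]
    by_cases hC1 : 2*i+1 < s ∧ hGet a i < hGet a (2*i+1)
    · simp only [if_pos hC1]
      by_cases hC2 : 2*i+2 < s ∧ hGet a (2*i+1) < hGet a (2*i+2)
      · simp only [if_pos hC2]
        rw [if_pos (show 2*i+2 ≠ i by omega)]
        refine IH _ _ _ _ (by omega) (by omega) (by rw [length_hSwap]; omega) ?_
        refine AOk_hSwap a i (2*i+2) s lo hlo (by omega) hC2.1 hs (by omega) h ?_ ?_
        · intro _; rw [if_neg (show ¬ (2*i+1 = 2*i+2) by omega)]; exact hC2.2.le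
        · intro _; rw [if_pos rfl]; exact (hC1.2.trans hC2.2).le
      · simp only [if_neg hC2]
        rw [if_pos (show 2*i+1 ≠ i by omega)]
        refine IH _ _ _ _ (by omega) (by omega) (by rw [length_hSwap]; omega) ?_
        refine AOk_hSwap a i (2*i+1) s lo hlo (by omega) hC1.1 hs (by omega) h ?_ ?_
        · intro _; rw [if_pos rfl]; exact hC1.2.le
        · intro hr; rw [if_neg (show ¬ (2*i+2 = 2*i+1) by omega)]
          by_contra hlt
          exact hC2 ⟨hr, by omega⟩
    · simp only [if_neg hC1]
      by_cases hC2 : 2*i+2 < s ∧ hGet a i < hGet a (2*i+2)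
      · simp only [if_pos hC2]
        rw [if_pos (show 2*i+2 ≠ i by omega)]
        refine IH _ _ _ _ (by omega) (by omega) (by rw [length_hSwap]; omega) ?_
        refine AOk_hSwap a i (2*i+2) s lo hlo (by omega) hC2.1 hs (by omega) h ?_ ?_
        · intro hl; rw [if_neg (show ¬ (2*i+1 = 2*i+2) by omega)]
          have : ¬ hGet a i < hGet a (2*i+1) := fun hx => hC1 ⟨hl, hx⟩
          omega
        · intro _; rw [if_pos rfl]; exact hC2.2.le
      · simp only [if_neg hC2]
        rw [if_neg (show ¬ (i ≠ i) by simp)]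
        intro j c hloj hj hc hcs
        rcases eq_or_ne j i with rfl | hji
        · rcases hc with rfl | rfl
          · have : ¬ hGet a j < hGet a (2*j+1) := fun hx => hC1 ⟨hcs, hx⟩
            omega
          · have : ¬ hGet a j < hGet a (2*j+2) := fun hx => hC2 ⟨hcs, hx⟩
            omega
        · exact h.1 j c hloj hj hji hc hcs

theorem maxHeapifyF_facts (fuel : Nat) : ∀ (a : List Int) (i s : Nat), s ≤ a.length →
    (maxHeapifyF fuel a i s).Perm a ∧ (maxHeapifyF fuel a i s).drop s = a.drop s := by
  induction fuel with
  | zero => intro a i s _; exact ⟨List.Perm.refl _, rfl⟩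
  | succ fuel IH =>
    intro a i s hs
    simp only [maxHeapifyF]
    by_cases hC1 : 2*i+1 < s ∧ hGet a i < hGet a (2*i+1)
    · simp only [if_pos hC1]
      by_cases hC2 : 2*i+2 < s ∧ hGet a (2*i+1) < hGet a (2*i+2)
      · simp only [if_pos hC2]
        rw [if_pos (show 2*i+2 ≠ i by omega)]
        have hrec := IH (hSwap a (2*i+2) i) (2*i+2) s (by rw [length_hSwap]; omega)
        have hsw := perm_hSwap a (2*i+2) i (by omega) (by omega)
        exact ⟨hrec.1.trans hsw, by
          rw [hrec.2, drop_hSwap a (2*i+2) i s (by omega) (by omega)]⟩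
      · simp only [if_neg hC2]
        rw [if_pos (show 2*i+1 ≠ i by omega)]
        have hrec := IH (hSwap a (2*i+1) i) (2*i+1) s (by rw [length_hSwap]; omega)
        have hsw := perm_hSwap a (2*i+1) i (by omega) (by omega)
        exact ⟨hrec.1.trans hsw, by
          rw [hrec.2, drop_hSwap a (2*i+1) i s (by omega) (by omega)]⟩
    · simp only [if_neg hC1]
      by_cases hC2 : 2*i+2 < s ∧ hGet a i < hGet a (2*i+2)
      · simp only [if_pos hC2]
        rw [if_pos (show 2*i+2 ≠ i by omega)]
        have hrec := IH (hSwap a (2*i+2) i) (2*i+2) s (by rw [length_hSwap]; omega)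
        have hsw := perm_hSwap a (2*i+2) i (by omega) (by omega)
        exact ⟨hrec.1.trans hsw, by
          rw [hrec.2, drop_hSwap a (2*i+2) i s (by omega) (by omega)]⟩
      · simp only [if_neg hC2]
        rw [if_neg (show ¬ (i ≠ i) by simp)]
        exact ⟨List.Perm.refl _, rfl⟩

theorem root_max (a : List Int) (s : Nat) (h : Ok a s 0) :
    ∀ j, j < s → hGet a j ≤ hGet a 0 := by
  intro j
  induction j using Nat.strong_induction_on with
  | _ j IHj =>
    intro hj
    rcases Nat.eq_zero_or_pos j with rfl | hpos
    · exact le_refl _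
    · have hp : j = 2*((j-1)/2)+1 ∨ j = 2*((j-1)/2)+2 := by omega
      have h1 : hGet a j ≤ hGet a ((j-1)/2) := h ((j-1)/2) j (Nat.zero_le _) (by omega) hp hj
      exact h1.trans (IHj ((j-1)/2) (by omega) (by omega))

-- build phase: folding maxheapify over q-1, …, 0 turns positions [0, n) into a max-heap
theorem build_max (n : Nat) : ∀ (q : Nat) (b : List Int), b.length = n → Ok b n q →
    ((PySem.List.pyRange ((q:Int) - 1) (-1) (-1)).foldl
        (fun acc i => maxHeapifyF (n+1) acc i.toNat n) b).Perm b ∧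
      Ok ((PySem.List.pyRange ((q:Int) - 1) (-1) (-1)).foldl
        (fun acc i => maxHeapifyF (n+1) acc i.toNat n) b) n 0 := by
  intro q
  induction q with
  | zero =>
    intro b hlen hOk
    rw [PySem.List.pyRange_neg_one_eq_nil (by norm_num)]
    exact ⟨List.Perm.refl _, by simpa using hOk⟩
  | succ q IH =>
    intro b hlen hOk
    have hcons : PySem.List.pyRange (((q+1:Nat):Int) - 1) (-1) (-1) =
        ((q:Nat):Int) :: PySem.List.pyRange ((q:Int) - 1) (-1) (-1) := by
      push_cast
      rw [PySem.List.pyRange_neg_one_cons (by omega)]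
      norm_num
    rw [hcons, List.foldl_cons]
    have htn : ((q:Nat):Int).toNat = q := by omega
    rw [htn]
    have hfacts := maxHeapifyF_facts (n+1) b q n (by omega)
    have hlen' : (maxHeapifyF (n+1) b q n).length = n := by rw [hfacts.1.length_eq, hlen]
    have hOk' : Ok (maxHeapifyF (n+1) b q n) n q := by
      refine sift_max (n+1) b q n q (le_refl _) (by omega) (by omega) ⟨?_, ?_⟩
      · intro j c hloj hj hji hc hcs
        exact hOk j c (by omega) hj hc hcs
      · intro p c hlop hp hpc hc hcs
        omega
    have hres := IH (maxHeapifyF (n+1) b q n) hlen' hOk'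
    exact ⟨hres.1.trans hfacts.1, hres.2⟩

theorem Ok_init (b : List Int) (n : Nat) : Ok b n (n/2) := by
  intro j c hloj hj hc hcs
  omega

-- the extraction loop's body ignores the loop variable: a fold is an iterate
theorem foldl_ext_iter (n : Nat) : ∀ (l : List Int) (st : List Int × Int),
    l.foldl (fun (st : List Int × Int) _ =>
        (maxHeapifyF (n+1) (hSwap st.1 0 (st.2 - 1).toNat) 0 (st.2 - 1).toNat, st.2 - 1)) st
    = (fun (st : List Int × Int) =>
        (maxHeapifyF (n+1) (hSwap st.1 0 (st.2 - 1).toNat) 0 (st.2 - 1).toNat, st.2 - 1))^[l.length]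
      st := by
  intro l
  induction l with
  | nil => intro st; rfl
  | cons y l IHl =>
    intro st
    simp only [List.foldl_cons, List.length_cons, IHl, Function.iterate_succ_apply]

-- the root of a max-heap whose first s entries are, as a multiset, the first s entries of
-- the ascending list S, is S[s-1]
theorem top_eq (b S : List Int) (s : Nat) (hs1 : 1 ≤ s) (hsb : s ≤ b.length)
    (hsS : s ≤ S.length)
    (hm : (↑(b.take s) : Multiset Int) = ↑(S.take s))
    (hpair : S.Pairwise (fun x y => x ≤ y))
    (hmax : ∀ j, j < s → hGet b j ≤ hGet b 0) : hGet b 0 = hGet S (s-1) := by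
  have hSmem : ∀ x ∈ S.take s, x ≤ S[s-1]'(by omega) := by
    intro x hx
    obtain ⟨i, hi, hx⟩ := List.mem_iff_getElem.mp hx
    have hiS : i < S.length := by
      have := hi; simp [List.length_take] at this; omega
    have hgt : (S.take s)[i]'hi = S[i]'hiS := List.getElem_take
    have his : i < s := by
      have := hi; simp [List.length_take] at this; omega
    rw [← hx, hgt]
    rcases eq_or_ne i (s-1) with rfl | hne
    · exact le_refl _
    · exact (List.pairwise_iff_getElem.mp hpair) i (s-1) hiS (by omega) (by omega)
  have hb0mem : hGet b 0 ∈ S.take s := by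
    have h1 : hGet b 0 ∈ b.take s := by
      rw [hGet_eq b 0 (by omega)]
      have h0 : (0:Nat) < (b.take s).length := by simp [List.length_take]; omega
      have := List.getElem_mem h0
      rwa [List.getElem_take] at this
    have hmem : hGet b 0 ∈ (↑(S.take s) : Multiset Int) := by
      rw [← hm]; exact_mod_cast h1
    exact_mod_cast hmem
  have hS1mem : S[s-1]'(by omega) ∈ b.take s := by
    have h1 : S[s-1]'(by omega) ∈ S.take s := by
      have h0 : s - 1 < (S.take s).length := by simp [List.length_take]; omega
      have := List.getElem_mem h0
      rwa [List.getElem_take] at this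
    have hmem : S[s-1]'(by omega) ∈ (↑(b.take s) : Multiset Int) := by
      rw [hm]; exact_mod_cast h1
    exact_mod_cast hmem
  have h1 : hGet b 0 ≤ S[s-1]'(by omega) := hSmem _ hb0mem
  have h2 : S[s-1]'(by omega) ≤ hGet b 0 := by
    obtain ⟨j, hj, hjeq⟩ := List.mem_iff_getElem.mp hS1mem
    have hjb : j < b.length := by
      have := hj; simp [List.length_take] at this; omega
    have hjs : j < s := by
      have := hj; simp [List.length_take] at this; omega
    rw [List.getElem_take] at hjeq
    rw [← hjeq, ← hGet_eq b j hjb]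
    exact hmax j hjs
  rw [hGet_eq S (s-1) (by omega)]
  omega

-- multiset decomposition of a list at position s
theorem coe_take_drop (x : List Int) (s : Nat) :
    (↑x : Multiset Int) = ↑(x.take s) + ↑(x.drop s) := by
  conv_lhs => rw [← List.take_append_drop s x]
  simp

theorem take_succ_coe (x : List Int) (s : Nat) (hs : 1 ≤ s) (hx : s ≤ x.length) :
    (↑(x.take s) : Multiset Int) = ↑(x.take (s-1)) + {hGet x (s-1)} := by
  have h2 : x.take (s-1+1) = x.take (s-1) ++ [x[s-1]'(by omega)] := by
    rw [List.take_add_one, List.getElem?_eq_getElem (by omega)]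
    rfl
  have h3 : x.take s = x.take (s-1) ++ [x[s-1]'(by omega)] := by
    rw [← h2]
    congr 1
    omega
  rw [h3, hGet_eq x (s-1) (by omega)]
  rfl

-- one extraction step of heap-select
theorem ext_step (n : Nat) (S : List Int) (hSlen : S.length = n)
    (hpair : S.Pairwise (fun x y => x ≤ y))
    (b : List Int) (t : Nat) (hlen : b.length = n) (ht : t + 1 ≤ n - 1) (hn : 2 ≤ n)
    (hm : (↑(b.take (n-t)) : Multiset Int) = ↑(S.take (n-t)))
    (hd : b.drop (n-t) = S.drop (n-t))
    (hOk : Ok b (n-t) 0) :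
    (maxHeapifyF (n+1) (hSwap b 0 (n-t-1)) 0 (n-t-1)).length = n ∧
      (↑((maxHeapifyF (n+1) (hSwap b 0 (n-t-1)) 0 (n-t-1)).take (n-(t+1))) : Multiset Int) =
        ↑(S.take (n-(t+1))) ∧
      (maxHeapifyF (n+1) (hSwap b 0 (n-t-1)) 0 (n-t-1)).drop (n-(t+1)) = S.drop (n-(t+1)) ∧
      Ok (maxHeapifyF (n+1) (hSwap b 0 (n-t-1)) 0 (n-t-1)) (n-(t+1)) 0 := by
  rw [show n - (t+1) = n - t - 1 by omega]
  have hs2 : 2 ≤ n - t := by omega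
  have hsn : n - t ≤ n := by omega
  generalize hsg : n - t = s at hs2 hsn hm hd hOk ⊢
  have hb'len : (hSwap b 0 (s-1)).length = n := by rw [length_hSwap, hlen]
  have hroot := root_max b s hOk
  have hb0 : hGet b 0 = hGet S (s-1) :=
    top_eq b S s (by omega) (by rw [hlen]; omega) (by rw [hSlen]; omega) hm hpair hroot
  have hv : ∀ c, hGet (hSwap b 0 (s-1)) c =
      if c = s-1 then hGet b 0 else if c = 0 then hGet b (s-1) else hGet b c := fun c =>
    hGet_hSwap b 0 (s-1) c (by rw [hlen]; omega) (by rw [hlen]; omega)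
  have hds : (hSwap b 0 (s-1)).drop s = S.drop s := by
    rw [drop_hSwap b 0 (s-1) s (by omega) (by omega)]; exact hd
  have hval : hGet (hSwap b 0 (s-1)) (s-1) = hGet S (s-1) := by
    rw [hv (s-1), if_pos rfl, hb0]
  have hdropb' : (hSwap b 0 (s-1)).drop (s-1) = S.drop (s-1) := by
    rw [List.drop_eq_getElem_cons (show s-1 < (hSwap b 0 (s-1)).length by rw [hb'len]; omega),
        List.drop_eq_getElem_cons (show s-1 < S.length by rw [hSlen]; omega)]
    rw [show s-1+1 = s by omega, hds]
    congr 1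
    rw [← hGet_eq _ (s-1) (by rw [hb'len]; omega), ← hGet_eq S (s-1) (by rw [hSlen]; omega)]
    exact hval
  have hbmult : (↑(hSwap b 0 (s-1)) : Multiset Int) = ↑b :=
    Multiset.coe_eq_coe.mpr (perm_hSwap b 0 (s-1) (by rw [hlen]; omega) (by rw [hlen]; omega))
  have htakeS : (↑((hSwap b 0 (s-1)).take s) : Multiset Int) = ↑(S.take s) := by
    have hA := coe_take_drop (hSwap b 0 (s-1)) s
    have hB := coe_take_drop b s
    have hdd : (hSwap b 0 (s-1)).drop s = b.drop s := drop_hSwap b 0 (s-1) s (by omega) (by omega)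
    rw [hbmult, hB, hdd] at hA
    exact (add_right_cancel hA).symm.trans hm
  have htake1 : (↑((hSwap b 0 (s-1)).take (s-1)) : Multiset Int) = ↑(S.take (s-1)) := by
    have hA := take_succ_coe (hSwap b 0 (s-1)) s (by omega) (by rw [hb'len]; omega)
    have hB := take_succ_coe S s (by omega) (by rw [hSlen]; omega)
    rw [htakeS, hB, hval] at hA
    exact (add_right_cancel hA).symm

  have hAOk : AOk (hSwap b 0 (s-1)) (s-1) 0 0 := by
    constructor
    · intro j c hloj hj hji hc hcs
      rw [hv c, hv j, if_neg (show ¬ (c = s-1) by omega), if_neg (show ¬ (c = 0) by omega),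
          if_neg (show ¬ (j = s-1) by omega), if_neg (show ¬ (j = 0) by omega)]
      exact hOk j c hloj (by omega) hc (by omega)
    · intro p c hlop hp hpc hc hcs
      omega
  have hfacts := maxHeapifyF_facts (n+1) (hSwap b 0 (s-1)) 0 (s-1) (by rw [hb'len]; omega)
  have hlen'' : (maxHeapifyF (n+1) (hSwap b 0 (s-1)) 0 (s-1)).length = n := by
    rw [hfacts.1.length_eq, hb'len]
  refine ⟨hlen'', ?_, ?_, ?_⟩
  · have hA := coe_take_drop (maxHeapifyF (n+1) (hSwap b 0 (s-1)) 0 (s-1)) (s-1)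
    have hB := coe_take_drop (hSwap b 0 (s-1)) (s-1)
    have hbb : (↑(maxHeapifyF (n+1) (hSwap b 0 (s-1)) 0 (s-1)) : Multiset Int) =
        ↑(hSwap b 0 (s-1)) := Multiset.coe_eq_coe.mpr hfacts.1
    rw [hbb, hB, hfacts.2] at hA
    exact (add_right_cancel hA).symm.trans htake1
  · rw [hfacts.2]; exact hdropb'
  · exact sift_max (n+1) (hSwap b 0 (s-1)) 0 (s-1) 0 (le_refl _) (by omega)
      (by rw [hb'len]; omega) hAOk

-- iterating the extraction step T times
theorem ext_iter (n : Nat) (S : List Int) (hSlen : S.length = n)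
    (hpair : S.Pairwise (fun x y => x ≤ y)) (hn : 1 ≤ n) :
    ∀ (T : Nat), T ≤ n - 1 → ∀ (b0 : List Int), b0.length = n →
      (↑(b0.take n) : Multiset Int) = ↑(S.take n) → b0.drop n = S.drop n → Ok b0 n 0 →
      ((fun (st : List Int × Int) =>
          (maxHeapifyF (n+1) (hSwap st.1 0 (st.2 - 1).toNat) 0 (st.2 - 1).toNat, st.2 - 1))^[T]
          (b0, (n:Int))).2 = (n:Int) - T ∧
        ((fun (st : List Int × Int) =>
          (maxHeapifyF (n+1) (hSwap st.1 0 (st.2 - 1).toNat) 0 (st.2 - 1).toNat, st.2 - 1))^[T]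
          (b0, (n:Int))).1.length = n ∧
        (↑(((fun (st : List Int × Int) =>
          (maxHeapifyF (n+1) (hSwap st.1 0 (st.2 - 1).toNat) 0 (st.2 - 1).toNat, st.2 - 1))^[T]
          (b0, (n:Int))).1.take (n-T)) : Multiset Int) = ↑(S.take (n-T)) ∧
        ((fun (st : List Int × Int) =>
          (maxHeapifyF (n+1) (hSwap st.1 0 (st.2 - 1).toNat) 0 (st.2 - 1).toNat, st.2 - 1))^[T]
          (b0, (n:Int))).1.drop (n-T) = S.drop (n-T) ∧
        Ok ((fun (st : List Int × Int) =>
          (maxHeapifyF (n+1) (hSwap st.1 0 (st.2 - 1).toNat) 0 (st.2 - 1).toNat, st.2 - 1))^[T]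
          (b0, (n:Int))).1 (n-T) 0 := by
  intro T
  induction T with
  | zero =>
    intro _ b0 h1 h2 h3 h4
    refine ⟨by simp, by simpa using h1, by simpa using h2, by simpa using h3, by simpa using h4⟩
  | succ T IH =>
    intro hT b0 h1 h2 h3 h4
    have hres := IH (by omega) b0 h1 h2 h3 h4
    rw [Function.iterate_succ_apply']
    have hstep := ext_step n S hSlen hpair
      ((fun (st : List Int × Int) =>
        (maxHeapifyF (n+1) (hSwap st.1 0 (st.2 - 1).toNat) 0 (st.2 - 1).toNat, st.2 - 1))^[T]
        (b0, (n:Int))).1 T hres.2.1 (by omega) (by omega) hres.2.2.1 hres.2.2.2.1 hres.2.2.2.2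
    have hT2 : (((fun (st : List Int × Int) =>
        (maxHeapifyF (n+1) (hSwap st.1 0 (st.2 - 1).toNat) 0 (st.2 - 1).toNat, st.2 - 1))^[T]
        (b0, (n:Int))).2 - 1).toNat = n - T - 1 := by
      rw [hres.1]; omega
    simp only [hT2]
    refine ⟨by rw [hres.1]; push_cast; ring, hstep.1, hstep.2.1, hstep.2.2.1, hstep.2.2.2⟩

-- the max-heap-select core computes the (n - i)-th entry of the ascending sort,
-- where i = max k 1 (k ≤ 0 does zero extractions, like k = 1)
theorem kthlargestA_eq (array : List Int) (k : Int) (hne : array ≠ [])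
    (hk : k ≤ (array.length : Int)) :
    kthlargestA array k =
      hGet (PySem.List.sorted array (fun x => x) false) (array.length - (max k 1).toNat) := by
  simp only [kthlargestA]
  set n := array.length with hn
  have hn1 : 1 ≤ n := List.length_pos_of_ne_nil hne
  set S := PySem.List.sorted array (fun x => x) false with hS
  have hSlen : S.length = n := by rw [hS, (PySem.List.sorted_perm _ _ _).length_eq]
  have hpair : S.Pairwise (fun x y => x ≤ y) := by
    simpa using PySem.List.sorted_pairwise (xs := array) (key := fun x => x)
  have hSperm : S.Perm array := PySem.List.sorted_perm _ _ _
  rw [show PySem.Int.floordiv (n : Int) 2 = ((n/2 : Nat) : Int) by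
    exact_mod_cast PySem.Int.floordiv_natCast n 2]
  have hbuild := build_max n (n/2) array hn.symm (Ok_init array n)
  set bld := (PySem.List.pyRange (((n/2 : Nat) : Int) - 1) (-1) (-1)).foldl
      (fun acc i => maxHeapifyF (n+1) acc i.toNat n) array with hbld
  have hblen : bld.length = n := by rw [hbuild.1.length_eq, hn]
  rw [foldl_ext_iter n (PySem.List.pyRange 1 k 1) (bld, (n:Int))]
  rw [show (PySem.List.pyRange 1 k 1).length = (k-1).toNat from by
    rw [PySem.List.length_pyRange_one]]
  have hiter := ext_iter n S hSlen hpair hn1 ((k-1).toNat) (by omega) bld hblen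
    (by
      rw [List.take_of_length_le (le_of_eq hblen), List.take_of_length_le (le_of_eq hSlen)]
      exact Multiset.coe_eq_coe.mpr (hbuild.1.trans hSperm.symm))
    (by rw [List.drop_eq_nil_of_le (le_of_eq hblen), List.drop_eq_nil_of_le (le_of_eq hSlen)])
    hbuild.2
  have hfin := top_eq ((fun (st : List Int × Int) =>
      (maxHeapifyF (n+1) (hSwap st.1 0 (st.2 - 1).toNat) 0 (st.2 - 1).toNat, st.2 - 1))^[(k-1).toNat]
      (bld, (n:Int))).1 S (n - (k-1).toNat) (by omega)
      (by rw [hiter.2.1]; omega) (by rw [hSlen]; omega) hiter.2.2.1 hpair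
      (root_max _ _ hiter.2.2.2.2)
  rw [hfin]
  congr 1
  omega

-- ===== the min-heap side, by negation =====

theorem hGet_map_neg (a : List Int) (j : Nat) :
    hGet (a.map (fun x => -x)) j = -(hGet a j) := by
  simp only [hGet, List.getD_eq_getElem?_getD, List.getElem?_map]
  cases h : a[j]? <;> simp [h]

theorem hSwap_map_neg (a : List Int) (i j : Nat) :
    hSwap (a.map (fun x => -x)) i j = (hSwap a i j).map (fun x => -x) := by
  simp only [hSwap, hGet_map_neg, List.map_set]

theorem map_neg_neg (a : List Int) : (a.map (fun x => -x)).map (fun x => -x) = a := by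
  simp [List.map_map]

theorem minHeapifyF_neg (fuel : Nat) : ∀ (a : List Int) (i s : Nat),
    minHeapifyF fuel a i s = (maxHeapifyF fuel (a.map (fun x => -x)) i s).map (fun x => -x) := by
  induction fuel with
  | zero => intro a i s; simp [minHeapifyF, maxHeapifyF, map_neg_neg]
  | succ fuel IH =>
    intro a i s
    simp only [minHeapifyF, maxHeapifyF, hGet_map_neg, neg_lt_neg_iff]
    by_cases hC1 : 2*i+1 < s ∧ hGet a (2*i+1) < hGet a i
    · simp only [if_pos hC1]
      by_cases hC2 : 2*i+2 < s ∧ hGet a (2*i+2) < hGet a (2*i+1)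
      · simp only [if_pos hC2]
        rw [if_pos (show 2*i+2 ≠ i by omega), if_pos (show 2*i+2 ≠ i by omega)]
        rw [IH, hSwap_map_neg]
      · simp only [if_neg hC2]
        rw [if_pos (show 2*i+1 ≠ i by omega), if_pos (show 2*i+1 ≠ i by omega)]
        rw [IH, hSwap_map_neg]
    · simp only [if_neg hC1]
      by_cases hC2 : 2*i+2 < s ∧ hGet a (2*i+2) < hGet a i
      · simp only [if_pos hC2]
        rw [if_pos (show 2*i+2 ≠ i by omega), if_pos (show 2*i+2 ≠ i by omega)]
        rw [IH, hSwap_map_neg]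
      · simp only [if_neg hC2]
        rw [if_neg (show ¬ (i ≠ i) by simp), if_neg (show ¬ (i ≠ i) by simp)]
        rw [map_neg_neg]

theorem kthsmallestA_neg (array : List Int) (k : Int) :
    kthsmallestA array k = - kthlargestA (array.map (fun x => -x)) k := by
  simp only [kthsmallestA, kthlargestA, List.length_map]
  have hbuild : ∀ (l : List Int) (b : List Int),
      l.foldl (fun acc i => minHeapifyF (array.length+1) acc i.toNat array.length) b =
        (l.foldl (fun acc i => maxHeapifyF (array.length+1) acc i.toNat array.length)
          (b.map (fun x => -x))).map (fun x => -x) := by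
    intro l
    induction l with
    | nil => intro b; simp [map_neg_neg]
    | cons y l IHl =>
      intro b
      simp only [List.foldl_cons]
      rw [IHl, minHeapifyF_neg]
      congr 2
      rw [map_neg_neg]
  have hext : ∀ (l : List Int) (b : List Int) (z : Int),
      l.foldl (fun (st : List Int × Int) _ =>
          (minHeapifyF (array.length+1) (hSwap st.1 0 (st.2 - 1).toNat) 0 (st.2 - 1).toNat,
            st.2 - 1)) (b, z) =
      (((l.foldl (fun (st : List Int × Int) _ =>
          (maxHeapifyF (array.length+1) (hSwap st.1 0 (st.2 - 1).toNat) 0 (st.2 - 1).toNat,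
            st.2 - 1)) (b.map (fun x => -x), z)).1).map (fun x => -x),
       (l.foldl (fun (st : List Int × Int) _ =>
          (maxHeapifyF (array.length+1) (hSwap st.1 0 (st.2 - 1).toNat) 0 (st.2 - 1).toNat,
            st.2 - 1)) (b.map (fun x => -x), z)).2) := by
    intro l
    induction l with
    | nil => intro b z; simp [map_neg_neg]
    | cons y l IHl =>
      intro b z
      simp only [List.foldl_cons]
      rw [IHl, minHeapifyF_neg, hSwap_map_neg]
      rw [map_neg_neg]
  rw [hbuild, hext, map_neg_neg, hGet_map_neg]

theorem sorted_neg (array : List Int) :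
    PySem.List.sorted (array.map (fun x => -x)) (fun x => x) false =
      ((PySem.List.sorted array (fun x => x) false).map (fun x => -x)).reverse := by
  apply PySem.List.sorted_id_eq_of_perm_of_pairwise
  · exact (List.reverse_perm _).trans ((PySem.List.sorted_perm _ _ _).map _)
  · rw [List.pairwise_reverse, List.pairwise_map]
    have hp := PySem.List.sorted_pairwise (xs := array) (key := fun x => x)
    refine hp.imp ?_
    intro a b h
    simp only [id] at h ⊢
    omega

theorem kthsmallestA_eq (array : List Int) (k : Int) (hne : array ≠ [])
    (hk : k ≤ (array.length : Int)) :
    kthsmallestA array k =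
      hGet (PySem.List.sorted array (fun x => x) false) ((max k 1).toNat - 1) := by
  have hn1 : 1 ≤ array.length := List.length_pos_of_ne_nil hne
  have hSlen : (PySem.List.sorted array (fun x => x) false).length = array.length :=
    (PySem.List.sorted_perm _ _ _).length_eq
  have hAne : array.map (fun x => -x) ≠ [] := by
    intro h
    exact hne (List.map_eq_nil_iff.mp h)
  have hAlen : (array.map (fun x => -x)).length = array.length := by simp
  rw [kthsmallestA_neg, kthlargestA_eq _ _ hAne (by rw [hAlen]; exact hk)]
  rw [sorted_neg, hAlen]
  have hi1 : (1:Int) ≤ max k 1 := le_max_right _ _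
  have hin : (max k 1) ≤ (array.length : Int) := by omega
  have hrevlen : (((PySem.List.sorted array (fun x => x) false).map (fun x => -x)).reverse).length
      = array.length := by simp [hSlen]
  rw [hGet_eq _ (array.length - (max k 1).toNat) (by rw [hrevlen]; omega),
      hGet_eq _ ((max k 1).toNat - 1) (by rw [hSlen]; omega)]
  rw [List.getElem_reverse, List.getElem_map]
  have hidx : ((PySem.List.sorted array (fun x => x) false).map fun x => -x).length - 1 -
      (array.length - (max k 1).toNat) = (max k 1).toNat - 1 := by
    simp only [List.length_map, hSlen]; omega
  simp only [hidx]
  omega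

-- ===== VERDICT =====

theorem kthlargestandsmallest_spec : Claim_equal_kthlargestandsmallest := by
  intro array k _ hpre
  obtain ⟨hne, hk⟩ := hpre
  unfold Spec_kthlargestandsmallest
  simp only [kthlargestandsmallest, kthlargestandsmallest_alt]
  have hn1 : 1 ≤ array.length := List.length_pos_of_ne_nil hne
  have hSlen : (PySem.List.sorted array (fun x => x) false).length = array.length :=
    (PySem.List.sorted_perm _ _ _).length_eq
  have hi1 : (1:Int) ≤ max k 1 := le_max_right _ _
  have hin : (max k 1) ≤ (array.length : Int) := by omega
  have hsm : (PySem.List.pyGet? (PySem.List.sorted array (fun x => x) false) (max k 1 - 1)).getD 0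
      = hGet (PySem.List.sorted array (fun x => x) false) ((max k 1).toNat - 1) := by
    rw [show PySem.List.pyGet? (PySem.List.sorted array (fun x => x) false) (max k 1 - 1) =
        (PySem.List.sorted array (fun x => x) false)[(max k 1 - 1).toNat]? from
      PySem.List.pyGet?_of_nonneg _ (by omega)]
    rw [List.getElem?_eq_getElem (by rw [hSlen]; omega)]
    rw [hGet_eq _ ((max k 1).toNat - 1) (by rw [hSlen]; omega)]
    simp only [Option.getD_some]
    congr 1
    omega
  have hlg : (PySem.List.pyGet? (PySem.List.sorted array (fun x => x) false)
        (((PySem.List.sorted array (fun x => x) false).length : Int) - max k 1)).getD 0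
      = hGet (PySem.List.sorted array (fun x => x) false)
          (array.length - (max k 1).toNat) := by
    rw [show PySem.List.pyGet? (PySem.List.sorted array (fun x => x) false)
          (((PySem.List.sorted array (fun x => x) false).length : Int) - max k 1) =
        (PySem.List.sorted array (fun x => x) false)[((
          (PySem.List.sorted array (fun x => x) false).length : Int) - max k 1).toNat]? from
      PySem.List.pyGet?_of_nonneg _ (by rw [hSlen]; omega)]
    rw [List.getElem?_eq_getElem (by rw [hSlen]; omega)]
    rw [hGet_eq _ (array.length - (max k 1).toNat) (by rw [hSlen]; omega)]
    simp only [Option.getD_some]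
    congr 1
    rw [hSlen]
    omega
  rw [kthsmallestA_eq array k hne hk, kthlargestA_eq array k hne hk, hsm, hlg]
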